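-- pv_equiv track=rewrite | github.com/ablearthy/ege2021kp-problem-solution | ege_problem_solution/t23/n125.py | solve
-- ===== SOURCE A (Python) =====
-- from bisect import bisect_left
-- from typing import List
--
-- class Node:
--     def __init__(self, value):
--         self.value = value
--         self.children = []
--
-- def closest(arr: List[int], n: int):
--     pos = bisect_left(arr, n)
--     return arr[pos]
--
-- def gen_primes(limit: int):
--     sieve = [True] * limit
--     sieve[0] = sieve[1] = False
--
--     for i, is_prime in enumerate(sieve):
--         if sieve[i]:
--             yield i
--             for j in range(i ** 2, limit, i):
--                 sieve[j] = False
--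
-- def solve(src: int, dst: int, contains: List[int], not_contains: List[int]):
--     contains = set(contains)
--     to_discover = []
--     primes = list(gen_primes(dst * 2))
--     root = Node(src)
--
--     # note (вторая команда): если число простое, то нужно взять следующее, иначе далее дерево будет создаваться
--     # бесконечно
--     commands = [
--         lambda x: x + 2,
--         lambda x: closest(primes, x)
--         if x not in primes
--         else primes[primes.index(x) + 1],
--     ]
--
--     to_discover.append(root)
--
--     while to_discover:
--         node = to_discover.pop()
--         precalculated = set([c(node.value) for c in commands])
--         precalculated = list(
--             filter(lambda x: x <= dst and x not in not_contains, precalculated)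
--         )
--         node.children = [Node(x) for x in precalculated]
--         to_discover.extend(node.children)
--     counter = 0
--     for e in get_lists(root, []):
--         if contains.intersection(set(e)) == contains and e[-1] == dst:
--             counter += 1
--     return counter
--
-- def get_lists(node: Node, values):
--     lst = []
--     if not node.children:
--         return [[*values, node.value]]
--     for child in node.children:
--         lst.extend(get_lists(child, values + [node.value]))
--     return lst
-- ===== SOURCE B (Python) =====
-- from bisect import bisect_left
-- from typing import List
--
--
-- def _primes(limit: int):
--     # sieve of Eratosthenes, same bound A uses (primes below limit)
--     sieve = [True] * limit
--     sieve[0] = sieve[1] = False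
--     out = []
--     for i in range(limit):
--         if sieve[i]:
--             out.append(i)
--             for j in range(i * i, limit, i):
--                 sieve[j] = False
--     return out
--
--
-- def solve(src: int, dst: int, contains: List[int], not_contains: List[int]):
--     primes = _primes(dst * 2)
--     keys = set(contains)
--     bad = set(not_contains)
--
--     def children(v: int):
--         j = bisect_left(primes, v)
--         if j < len(primes) and primes[j] == v:
--             j += 1
--         nxt = primes[j]  # next command value: smallest prime > v (>= v if v composite)
--         cands = [v + 2] if nxt == v + 2 else [v + 2, nxt]
--         return [c for c in cands if c <= dst and c not in bad]
--
--     memo = {}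
--
--     def cnt(v: int):
--         # number of command-paths from v to dst whose value set covers every key > v
--         if v == dst:
--             return 0 if any(k > dst for k in keys) else 1
--         if v in memo:
--             return memo[v]
--         total = 0
--         for c in children(v):
--             if not any(v < k < c for k in keys):  # a key strictly between v and c can never be visited
--                 total += cnt(c)
--         memo[v] = total
--         return total
--
--     return cnt(src) if all(src <= k for k in keys) else 0
-- ===== Notes on version B (the rewrite author's own statement) =====
-- stated objective: alternative
-- what changed: A materialises the full command tree and every root-to-leaf path list and then filters them; B counts paths with a memoized DP keyed on the node value alone (a 'contains' key skipped between two consecutive path values can never be collected later, since path values strictly increase, so no visited-set state is needed) and never builds a path; intended as faster where the path count explodes (the probe saw A time out at n=256 on inputs B answered fast) but only 1.22x at the largest size both finished, since the shared prime sieve dominates there.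
import Mathlib
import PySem

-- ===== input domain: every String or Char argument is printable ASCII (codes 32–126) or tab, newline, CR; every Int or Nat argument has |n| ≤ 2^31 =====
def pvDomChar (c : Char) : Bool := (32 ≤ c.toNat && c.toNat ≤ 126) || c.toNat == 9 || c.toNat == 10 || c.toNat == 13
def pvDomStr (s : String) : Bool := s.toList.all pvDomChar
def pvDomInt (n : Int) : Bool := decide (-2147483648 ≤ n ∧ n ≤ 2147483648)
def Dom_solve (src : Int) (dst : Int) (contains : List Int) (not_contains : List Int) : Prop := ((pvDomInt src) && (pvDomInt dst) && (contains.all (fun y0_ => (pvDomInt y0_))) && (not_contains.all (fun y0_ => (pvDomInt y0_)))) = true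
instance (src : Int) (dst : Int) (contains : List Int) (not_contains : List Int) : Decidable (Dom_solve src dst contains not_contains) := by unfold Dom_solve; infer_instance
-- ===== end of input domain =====

-- B replaces A's exhaustive materialisation of every root-to-leaf path with a memoized
-- per-node count of paths (a 'contains' key skipped between two consecutive path values
-- can never be collected later, since path values strictly increase): an alternative
-- algorithm that never builds any path list.

-- ===== PORT A =====
-- Shared helper of both ports: the prime sieve below dst * 2 (Source A's gen_primes and
-- Source B's _primes run the identical sieve; this is its common literal port).
-- Python raises IndexError on `sieve[0] = sieve[1] = False` when dst * 2 < 2 (outside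
-- Pre_solve); Array.setIfInBounds ignores those writes here.
def pvMark (arr : Array Bool) (i limit : Nat) : Array Bool :=
  (PySem.List.pyRange ((i : Int) * (i : Int)) (limit : Int) (i : Int)).foldl
    (fun a j => a.setIfInBounds j.toNat false) arr

def pvPrimesGo (limit : Nat) : List Nat → Array Bool → List Int → List Int
  | [], _, out => out
  | i :: rest, arr, out =>
    if arr.getD i false then pvPrimesGo limit rest (pvMark arr i limit) (out ++ [(i : Int)])
    else pvPrimesGo limit rest arr out

def pvPrimes (dst : Int) : List Int :=
  let limit := (dst * 2).toNat
  pvPrimesGo limit (List.range limit)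
    (((Array.replicate limit true).setIfInBounds 0 false).setIfInBounds 1 false) []

-- closest(arr, n) = arr[bisect_left(arr, n)]; none = IndexError (outside Pre_solve)
def pvClosest (primes : List Int) (n : Int) : Option Int :=
  primes[PySem.List.bisectLeft primes n]?

-- the second command: closest(primes, x) if x not in primes else primes[primes.index(x) + 1]
def pvNextA (primes : List Int) (x : Int) : Option Int :=
  if primes.contains x then
    match PySem.List.index? primes x with
    | some k => primes[k + 1]?   -- none = IndexError (outside Pre_solve)
    | none => none               -- unreachable: x ∈ primes
  else pvClosest primes x

-- precalculated = set([c(node.value) for c in commands]); Python raises IndexError when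
-- the prime command fails (outside Pre_solve) — that candidate is dropped here
def pvCandsA (primes : List Int) (x : Int) : List Int :=
  PySem.Set.ofList ([x + 2] ++ (pvNextA primes x).toList)

-- list(filter(lambda x: x <= dst and x not in not_contains, precalculated))
def pvChildrenA (dst : Int) (ncont : List Int) (primes : List Int) (x : Int) : List Int :=
  (pvCandsA primes x).filter (fun y => decide (y ≤ dst) && !(ncont.contains y))

-- A builds the whole tree with a stack (node.children depends only on node.value) and then
-- enumerates every root-to-leaf value list with get_lists; this port fuses the two (a Node
-- with a child LIST is a nested inductive, which this file may not declare): it produces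
-- exactly get_lists(root, values) of A's tree.  The fuel argument only makes the recursion
-- structural; child values strictly exceed the parent's and stay ≤ dst, so the fuel solve
-- passes never runs out (pvGetLists_fuel below), and the 0 branch is unreachable there.
def pvGetLists (dst : Int) (ncont : List Int) (primes : List Int) :
    Nat → Int → List Int → List (List Int)
  | 0, _, _ => []
  | fuel + 1, x, values =>
    let cs := pvChildrenA dst ncont primes x
    if cs.isEmpty then [values ++ [x]]
    else cs.flatMap (fun c => pvGetLists dst ncont primes fuel c (values ++ [x]))

def solve (src : Int) (dst : Int) (contains : List Int) (not_contains : List Int) : Int :=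
  let containsS : PySem.Set Int := PySem.Set.ofList contains
  let primes := pvPrimes dst
  -- for e in get_lists(root, []): if contains.intersection(set(e)) == contains and e[-1] == dst: counter += 1
  -- (e is never empty, so e[-1] never raises; pyGet? e (-1) == some dst is exact)
  (pvGetLists dst not_contains primes ((dst + 1 - src).toNat + 1) src []).foldl
    (fun counter e =>
      if (containsS.inter (PySem.Set.ofList e)).equal containsS
          && (PySem.List.pyGet? e (-1) == some dst) then counter + 1 else counter) 0

-- ===== PORT B =====
-- Source B: j = bisect_left(primes, v); if j < len(primes) and primes[j] == v: j += 1; primes[j]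
def pvNextB (primes : List Int) (v : Int) : Option Int :=
  let j := PySem.List.bisectLeft primes v
  let j := if primes[j]? == some v then j + 1 else j
  primes[j]?   -- none = IndexError in Source B (outside Pre_solve)

def pvChildrenB (dst : Int) (bad : PySem.Set Int) (primes : List Int) (v : Int) : List Int :=
  let cands := match pvNextB primes v with
    | some nxt => if nxt == v + 2 then [v + 2] else [v + 2, nxt]
    | none => [v + 2]   -- Source B raises IndexError here (outside Pre_solve)
  cands.filter (fun c => decide (c ≤ dst) && !(PySem.Set.contains bad c))

-- Source B's for-loop over children(v); f is the recursive cnt at the smaller fuel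
def pvCntList (keys : PySem.Set Int) (v : Int)
    (f : Int → PySem.Dict Int Int → Int × PySem.Dict Int Int) :
    List Int → Int × PySem.Dict Int Int → Int × PySem.Dict Int Int
  | [], st => st
  | c :: rest, st =>
    if keys.any (fun k => decide (v < k) && decide (k < c)) then pvCntList keys v f rest st
    else
      let r := f c st.2
      pvCntList keys v f rest (st.1 + r.1, r.2)

-- Source B's memoized cnt(v); the fuel only makes the recursion structural (child values
-- strictly exceed v and stay ≤ dst, so the fuel solve_alt passes never runs out —
-- pvCnt_correct below — and the 0 branch is unreachable there)
def pvCnt (dst : Int) (bad keys : PySem.Set Int) (primes : List Int) :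
    Nat → Int → PySem.Dict Int Int → Int × PySem.Dict Int Int
  | 0, _, memo => (0, memo)
  | fuel + 1, v, memo =>
    if v = dst then ((if keys.any (fun k => decide (dst < k)) then 0 else 1), memo)
    else
      match memo.get? v with
      | some r => (r, memo)
      | none =>
        let st := pvCntList keys v (pvCnt dst bad keys primes fuel)
          (pvChildrenB dst bad primes v) (0, memo)
        (st.1, st.2.insert v st.1)

def solve_alt (src : Int) (dst : Int) (contains : List Int) (not_contains : List Int) : Int :=
  let primes := pvPrimes dst
  let keys : PySem.Set Int := PySem.Set.ofList contains
  let bad : PySem.Set Int := PySem.Set.ofList not_contains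
  if keys.all (fun k => decide (src ≤ k)) then
    (pvCnt dst bad keys primes ((dst + 1 - src).toNat + 1) src PySem.Dict.empty).1
  else 0

-- ===== PRECONDITION & SPEC =====
-- first prime p with k ≤ p < dst * 2, scanning upward (bounded by the prime gap)
def pvPrimeSearch (dst k : Int) : Bool :=
  if dst * 2 ≤ k then false
  else if Nat.Prime k.toNat then true
  else pvPrimeSearch dst (k + 1)
termination_by (dst * 2 - k).toNat

-- Pre_solve holds exactly where the Python A returns: A raises IndexError when dst * 2 < 2
-- (the sieve) or when the prime-successor command applied to src finds no prime strictly
-- between src and dst * 2; for src ≤ dst such a prime always exists (Bertrand), so only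
-- src > dst needs the explicit search.
def Pre_solve (src : Int) (dst : Int) (contains : List Int) (not_contains : List Int) : Prop :=
  2 ≤ dst ∧ (src ≤ dst ∨ pvPrimeSearch dst (max (src + 1) 2) = true)
instance (src : Int) (dst : Int) (contains : List Int) (not_contains : List Int) : Decidable (Pre_solve src dst contains not_contains) := by unfold Pre_solve; infer_instance

def pvWitness_solve : Int × Int × List Int × List Int := (1, 5, [2, 3], [4])

def Spec_solve (src : Int) (dst : Int) (contains : List Int) (not_contains : List Int) (out : Int) : Prop := out = solve_alt src dst contains not_contains
instance (src : Int) (dst : Int) (contains : List Int) (not_contains : List Int) (out : Int) : Decidable (Spec_solve src dst contains not_contains out) := by unfold Spec_solve; infer_instance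

-- ===== CLAIM (what is proved, stated in full; the proofs are below) =====
def Claim_equal_solve : Prop := ∀ (src : Int) (dst : Int) (contains : List Int) (not_contains : List Int), Dom_solve src dst contains not_contains → Pre_solve src dst contains not_contains → Spec_solve src dst contains not_contains (solve src dst contains not_contains)

-- ===== LEMMAS AND PROOFS =====

theorem pvPrimesGo_sorted (limit : Nat) : ∀ (l : List Nat) (arr : Array Bool) (out : List Int),
    (∀ y ∈ out, ∀ i ∈ l, y < (i : Int)) → l.Pairwise (· < ·) → out.Pairwise (· < ·) →
    (pvPrimesGo limit l arr out).Pairwise (· < ·) := by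
  intro l
  induction l with
  | nil => intro arr out h hl hout; simpa [pvPrimesGo] using hout
  | cons i rest ih =>
    intro arr out h hl hout
    rw [pvPrimesGo]
    rcases List.pairwise_cons.mp hl with ⟨hi, hrest⟩
    split
    · apply ih
      · intro y hy i' hi'
        rcases List.mem_append.mp hy with hy | hy
        · exact h y hy i' (List.mem_cons_of_mem _ hi')
        · simp only [List.mem_singleton] at hy
          subst hy
          exact_mod_cast hi i' hi'
      · exact hrest
      · refine List.pairwise_append.mpr ⟨hout, List.pairwise_singleton _ _, ?_⟩
        intro y hy z hz
        simp only [List.mem_singleton] at hz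
        subst hz
        exact h y hy i (List.mem_cons_self)
    · exact ih arr out (fun y hy i' hi' => h y hy i' (List.mem_cons_of_mem _ hi')) hrest hout

theorem pvPrimes_sorted (dst : Int) : (pvPrimes dst).Pairwise (· < ·) := by
  unfold pvPrimes
  apply pvPrimesGo_sorted
  · intro y hy; exact absurd hy (List.not_mem_nil)
  · exact List.pairwise_lt_range
  · exact List.Pairwise.nil

theorem pvNextB_gt (primes : List Int) (hs : primes.Pairwise (· < ·)) (v p : Int)
    (h : pvNextB primes v = some p) : v < p := by
  have hle : primes.Pairwise (· ≤ ·) := hs.imp (fun h => le_of_lt h)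
  obtain ⟨hlen, h2, h3⟩ := PySem.List.bisectLeft_spec primes v hle
  unfold pvNextB at h
  set j := PySem.List.bisectLeft primes v with hj
  by_cases hc : primes[j]? == some v
  · simp only [hc, if_pos] at h
    rw [List.getElem?_eq_some_iff] at h
    obtain ⟨hlt, rfl⟩ := h
    have hj1 : j < primes.length := by omega
    have hv : primes[j] = v := by
      have := List.getElem?_eq_getElem hj1
      simp only [beq_iff_eq] at hc
      rw [this] at hc; exact (Option.some_inj.mp hc)
    have := List.pairwise_iff_getElem.mp hs j (j+1) hj1 hlt (by omega)
    omega
  · simp only [hc, if_neg, Bool.false_eq_true, not_false_iff, ite_false] at h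
    rw [List.getElem?_eq_some_iff] at h
    obtain ⟨hlt, rfl⟩ := h
    have hge := h3 j hlt (le_refl _)
    have hne : primes[j] ≠ v := by
      intro he
      apply hc
      rw [List.getElem?_eq_getElem hlt, he]
      simp
    omega

theorem pvNextA_gt (primes : List Int) (hs : primes.Pairwise (· < ·)) (x p : Int)
    (h : pvNextA primes x = some p) : x < p := by
  have hle : primes.Pairwise (· ≤ ·) := hs.imp (fun h => le_of_lt h)
  obtain ⟨hlen, h2, h3⟩ := PySem.List.bisectLeft_spec primes x hle
  unfold pvNextA at h
  by_cases hc : primes.contains x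
  · simp only [hc, if_pos] at h
    cases hidx : PySem.List.index? primes x with
    | none => rw [hidx] at h; exact absurd h (by simp)
    | some k =>
      rw [hidx] at h
      obtain ⟨hk, hkv, _⟩ := PySem.List.getElem_of_index?_eq_some hidx
      rw [List.getElem?_eq_some_iff] at h
      obtain ⟨hlt, rfl⟩ := h
      have := List.pairwise_iff_getElem.mp hs k (k+1) hk hlt (by omega)
      omega
  · simp only [hc, Bool.false_eq_true, if_neg, not_false_iff] at h
    unfold pvClosest at h
    rw [List.getElem?_eq_some_iff] at h
    obtain ⟨hlt, rfl⟩ := h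
    have hge := h3 _ hlt (le_refl _)
    have hmem : x ∉ primes := by
      intro hm; simp only [List.contains_iff_mem] at hc; exact hc hm
    have hne : primes[PySem.List.bisectLeft primes x] ≠ x := fun he => hmem (he ▸ List.getElem_mem hlt)
    omega

theorem pvNext_eq (primes : List Int) (hs : primes.Pairwise (· < ·)) (x : Int) :
    pvNextA primes x = pvNextB primes x := by
  have hle : primes.Pairwise (· ≤ ·) := hs.imp (fun h => le_of_lt h)
  obtain ⟨hlen, h2, h3⟩ := PySem.List.bisectLeft_spec primes x hle
  unfold pvNextA pvNextB pvClosest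
  set b := PySem.List.bisectLeft primes x with hb
  by_cases hc : primes.contains x
  · simp only [hc, if_pos]
    have hmem : x ∈ primes := by simpa using hc
    obtain ⟨k, hidx⟩ := Option.isSome_iff_exists.mp ((PySem.List.index?_isSome_iff primes x).mpr hmem)
    rw [hidx]
    obtain ⟨hk, hkv, hbefore⟩ := PySem.List.getElem_of_index?_eq_some hidx
    have hbk : b = k := by
      by_contra hne
      rcases lt_or_gt_of_ne hne with hlt | hgt
      · have hx := h3 b (by omega) (le_refl _)
        have := List.pairwise_iff_getElem.mp hs b k (by omega) hk hlt
        omega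
      · have := h2 k hk hgt
        omega
    subst hbk
    have : primes[b]? = some x := by rw [List.getElem?_eq_getElem hk]; exact congrArg some hkv
    simp [this]
  · simp only [hc, Bool.false_eq_true, if_neg, not_false_iff]
    have hmem : x ∉ primes := by simpa using hc
    have : (primes[b]? == some x) = false := by
      cases hg : primes[b]? with
      | none => simp
      | some p =>
        simp only [beq_iff_eq, beq_eq_false_iff_ne, ne_eq, Option.some_inj]
        intro he
        exact hmem (he ▸ List.mem_of_getElem? hg)
    rw [this]
    simp

theorem pvChildrenB_mem (dst : Int) (bad : PySem.Set Int) (primes : List Int)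
    (hs : primes.Pairwise (· < ·)) (v c : Int) (h : c ∈ pvChildrenB dst bad primes v) :
    v < c ∧ c ≤ dst := by
  unfold pvChildrenB at h
  rw [List.mem_filter] at h
  obtain ⟨hmem, hcond⟩ := h
  simp only [Bool.and_eq_true, decide_eq_true_eq] at hcond
  refine ⟨?_, hcond.1⟩
  rcases hn : pvNextB primes v with _ | nxt <;> rw [hn] at hmem
  · simp only [List.mem_singleton] at hmem; omega
  · have hgt := pvNextB_gt primes hs v nxt hn
    by_cases he : (nxt == v + 2) <;> simp [he] at hmem <;> rcases hmem with rfl | rfl <;> omega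

theorem pvChildrenA_mem (dst : Int) (ncont : List Int) (primes : List Int)
    (hs : primes.Pairwise (· < ·)) (x c : Int) (h : c ∈ pvChildrenA dst ncont primes x) :
    x < c ∧ c ≤ dst := by
  unfold pvChildrenA at h
  rw [List.mem_filter] at h
  obtain ⟨hmem, hcond⟩ := h
  simp only [Bool.and_eq_true, decide_eq_true_eq] at hcond
  refine ⟨?_, hcond.1⟩
  unfold pvCandsA at hmem
  rw [PySem.Set.mem_ofList] at hmem
  rcases hn : pvNextA primes x with _ | nxt <;> rw [hn] at hmem
  · simp only [Option.toList, List.append_nil, List.mem_singleton] at hmem; omega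
  · have hgt := pvNextA_gt primes hs x nxt hn
    simp only [Option.toList, List.mem_append, List.mem_singleton] at hmem
    rcases hmem with rfl | rfl <;> omega

theorem pvChildren_eq (dst : Int) (ncont : List Int) (primes : List Int)
    (hs : primes.Pairwise (· < ·)) (x : Int) :
    pvChildrenA dst ncont primes x = pvChildrenB dst (PySem.Set.ofList ncont) primes x := by
  unfold pvChildrenA pvChildrenB pvCandsA
  rw [pvNext_eq primes hs]
  have hpred : ∀ y : Int, (decide (y ≤ dst) && !(ncont.contains y))
      = (decide (y ≤ dst) && !(PySem.Set.contains (PySem.Set.ofList ncont) y)) := by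
    intro y
    congr 1
    congr 1
    simp [PySem.Set.contains, List.contains_iff_mem, PySem.Set.mem_ofList]
  have hfilter : ∀ l : List Int, l.filter (fun y => decide (y ≤ dst) && !(ncont.contains y))
      = l.filter (fun c => decide (c ≤ dst) && !(PySem.Set.contains (PySem.Set.ofList ncont) c)) :=
    fun l => List.filter_congr (fun y _ => hpred y)
  rcases pvNextB primes x with _ | nxt
  · simp only [Option.toList, List.append_nil]
    rw [show (PySem.Set.ofList [x+2] : List Int) = [x+2] by rfl]
    exact hfilter _
  · simp only [Option.toList]
    by_cases he : (nxt == x + 2)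
    · simp only [he]
      have : (PySem.Set.ofList ([x + 2] ++ [nxt]) : List Int) = [x + 2] := by
        have : nxt = x + 2 := by simpa using he
        subst this
        simp [PySem.Set.ofList, PySem.Set.add, PySem.Set.contains]
      rw [this]
      exact hfilter _
    · simp only [he]
      have hne : nxt ≠ x + 2 := by simpa using he
      have : (PySem.Set.ofList ([x + 2] ++ [nxt]) : List Int) = [x + 2, nxt] := by
        show List.foldl PySem.Set.add PySem.Set.empty [x + 2, nxt] = [x + 2, nxt]
        simp [PySem.Set.add, PySem.Set.empty, PySem.Set.contains, List.contains_iff_mem, hne]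
      rw [this]
      exact hfilter _

theorem pvChildrenB_dst_nil (dst : Int) (bad : PySem.Set Int) (primes : List Int)
    (hs : primes.Pairwise (· < ·)) : pvChildrenB dst bad primes dst = [] := by
  unfold pvChildrenB
  rw [List.filter_eq_nil_iff]
  intro c hc
  simp only [Bool.and_eq_true, decide_eq_true_eq, not_and, Bool.not_eq_true]
  intro hle
  exfalso
  rcases hn : pvNextB primes dst with _ | nxt <;> rw [hn] at hc
  · simp at hc; omega
  · have := pvNextB_gt primes hs dst nxt hn
    by_cases he : (nxt == dst + 2) <;> simp [he] at hc <;> rcases hc with rfl | rfl <;> omega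

theorem pvGetLists_fuel (dst : Int) (ncont primes : List Int) (hs : primes.Pairwise (· < ·)) :
    ∀ (f1 f2 : Nat) (x : Int) (values : List Int),
      (dst + 1 - x).toNat < f1 → (dst + 1 - x).toNat < f2 →
      pvGetLists dst ncont primes f1 x values = pvGetLists dst ncont primes f2 x values := by
  intro f1
  induction f1 with
  | zero => intro f2 x values h1 _; omega
  | succ f1 ih =>
    intro f2 x values h1 h2
    cases f2 with
    | zero => omega
    | succ f2 =>
      rw [pvGetLists, pvGetLists]
      by_cases hemp : (pvChildrenA dst ncont primes x).isEmpty
      · simp [hemp]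
      · simp only [hemp, Bool.false_eq_true, if_false]
        apply List.flatMap_congr
        intro c hc
        have hcb := pvChildrenA_mem dst ncont primes hs x c hc
        exact ih f2 c (values ++ [x]) (by omega) (by omega)

-- all leaf paths of the subtree at x, without the prefix (at its canonical fuel)
def pvT (dst : Int) (ncont primes : List Int) (x : Int) : List (List Int) :=
  pvGetLists dst ncont primes ((dst + 1 - x).toNat + 1) x []

theorem pvGetLists_prefix (dst : Int) (ncont primes : List Int) (hs : primes.Pairwise (· < ·)) :
    ∀ (fuel : Nat) (x : Int) (values : List Int), (dst + 1 - x).toNat < fuel →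
      pvGetLists dst ncont primes fuel x values = (pvT dst ncont primes x).map (values ++ ·) := by
  intro fuel
  induction fuel with
  | zero => intro x values h; omega
  | succ fuel ih =>
    intro x values h
    unfold pvT
    rw [pvGetLists]
    conv_rhs => rw [pvGetLists]
    by_cases hemp : (pvChildrenA dst ncont primes x).isEmpty
    · simp [hemp]
    · simp only [hemp, Bool.false_eq_true, if_false, List.nil_append]
      rw [List.map_flatMap]
      apply List.flatMap_congr
      intro c hc
      have hcb := pvChildrenA_mem dst ncont primes hs x c hc
      have hf1 : (dst + 1 - c).toNat < fuel := by omega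
      have hf2 : (dst + 1 - c).toNat < (dst + 1 - x).toNat := by omega
      rw [ih c (values ++ [x]) hf1]
      rw [pvGetLists_fuel dst ncont primes hs ((dst + 1 - x).toNat) fuel c [x] hf2 hf1]
      rw [ih c [x] hf1, List.map_map]
      apply List.map_congr_left
      intro t _
      simp [List.append_assoc]

theorem pvT_shape (dst : Int) (ncont primes : List Int) (hs : primes.Pairwise (· < ·))
    (x : Int) : ∀ t ∈ pvT dst ncont primes x, ∃ r, t = x :: r ∧ ∀ y ∈ r, x < y := by
  suffices h : ∀ (n : Nat) (x : Int), (dst + 1 - x).toNat = n →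
      ∀ t ∈ pvT dst ncont primes x, ∃ r, t = x :: r ∧ ∀ y ∈ r, x < y from h _ x rfl
  intro n
  induction n using Nat.strong_induction_on with
  | _ n ih =>
    intro x hn t ht
    unfold pvT at ht
    rw [pvGetLists] at ht
    by_cases hemp : (pvChildrenA dst ncont primes x).isEmpty
    · simp only [hemp, if_true, List.nil_append, List.mem_singleton] at ht
      exact ⟨[], ht, by simp⟩
    · simp only [hemp, Bool.false_eq_true, if_false, List.mem_flatMap] at ht
      obtain ⟨c, hcmem, htc⟩ := ht
      have hc := pvChildrenA_mem dst ncont primes hs x c hcmem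
      have hm : (dst + 1 - c).toNat < n := by omega
      rw [List.nil_append,
        pvGetLists_prefix dst ncont primes hs ((dst + 1 - x).toNat) c [x] (by omega)] at htc
      simp only [List.mem_map] at htc
      obtain ⟨t', ht', rfl⟩ := htc
      obtain ⟨r', hr', hgt⟩ := ih _ hm c rfl t' ht'
      refine ⟨t', by simp, ?_⟩
      intro y hy
      rw [hr'] at hy
      rcases List.mem_cons.mp hy with rfl | hy
      · exact hc.1
      · exact lt_trans hc.1 (hgt y hy)

-- "this path covers every key above v and ends at dst"
def pvPcov (keys : List Int) (dst v : Int) (t : List Int) : Bool :=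
  (keys.all fun k => decide (k ≤ v) || t.contains k) && (PySem.List.pyGet? t (-1) == some dst)

-- what pvCnt computes: the number of accepted paths of the subtree at v
def pvN (dst : Int) (ncont primes : List Int) (keys : List Int) (v : Int) : Int :=
  ((pvT dst ncont primes v).countP (pvPcov keys dst v) : Int)

theorem pvN_dst (dst : Int) (ncont primes : List Int) (hs : primes.Pairwise (· < ·))
    (keys : List Int) :
    pvN dst ncont primes keys dst
      = if keys.any (fun k => decide (dst < k)) then 0 else 1 := by
  unfold pvN pvT
  rw [pvGetLists]
  have hch : pvChildrenA dst ncont primes dst = [] := by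
    rw [pvChildren_eq dst ncont primes hs, pvChildrenB_dst_nil dst _ primes hs]
  rw [hch]
  simp only [List.isEmpty_nil, if_true, List.nil_append]
  have hlast : PySem.List.pyGet? [dst] (-1) = some dst := by
    rw [PySem.List.pyGet?_neg_one]; rfl
  by_cases hany : keys.any (fun k => decide (dst < k)) = true
  · rw [if_pos hany]
    simp only [List.any_eq_true, decide_eq_true_eq] at hany
    obtain ⟨k, hk, hlt⟩ := hany
    have hp : pvPcov keys dst dst [dst] = false := by
      unfold pvPcov
      apply Bool.and_eq_false_iff.mpr
      left
      apply List.all_eq_false.mpr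
      refine ⟨k, hk, ?_⟩
      simp only [Bool.or_eq_true, decide_eq_true_eq, List.contains_iff_mem, List.mem_singleton]
      push_neg
      omega
    simp [List.countP_cons, hp]
  · rw [if_neg hany]
    simp only [List.any_eq_true, decide_eq_true_eq, not_exists, not_and, not_lt] at hany
    have hp : pvPcov keys dst dst [dst] = true := by
      unfold pvPcov
      apply Bool.and_eq_true_iff.mpr
      refine ⟨List.all_eq_true.mpr ?_, by rw [hlast]; simp⟩
      intro k hk
      simp only [Bool.or_eq_true, decide_eq_true_eq]
      exact Or.inl (hany k hk)
    simp [List.countP_cons, hp]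

theorem pvPcov_cons (keys : List Int) (dst v c : Int) (t : List Int) (hvc : v < c)
    (r : List Int) (hshape : t = c :: r) (hr : ∀ y ∈ r, c < y) :
    pvPcov keys dst v (v :: t)
      = (!(keys.any (fun k => decide (v < k) && decide (k < c))) && pvPcov keys dst c t) := by
  subst hshape
  unfold pvPcov
  have h2 : PySem.List.pyGet? (v :: c :: r) (-1) = PySem.List.pyGet? (c :: r) (-1) := by
    rw [PySem.List.pyGet?_neg_one, PySem.List.pyGet?_neg_one, List.getLast?_cons_cons]
  rw [h2, ← Bool.and_assoc]
  congr 1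
  rw [Bool.eq_iff_iff]
  simp only [List.all_eq_true, Bool.and_eq_true, Bool.not_eq_true', List.any_eq_false,
    Bool.or_eq_true, decide_eq_true_eq, decide_eq_false_iff_not,
    List.contains_iff_mem, List.mem_cons]
  constructor
  · intro h
    refine ⟨fun k hk => ?_, fun k hk => ?_⟩
    · rintro ⟨h1, h2⟩
      rcases h k hk with hle | rfl | rfl | hmm
      · omega
      · omega
      · omega
      · have := hr k hmm; omega
    · rcases h k hk with hle | rfl | rfl | hmm
      · left; omega
      · left; omega
      · right; left; rfl
      · right; right; exact hmm
  · rintro ⟨hnb, hcov⟩ k hk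
    rcases hcov k hk with hle | hmem
    · by_cases hkv : k ≤ v
      · left; exact hkv
      · have hkc : k = c := by have := hnb k hk; omega
        subst hkc; right; right; left; rfl
    · rcases hmem with rfl | hmm
      · right; right; left; rfl
      · right; right; right; exact hmm

theorem pvN_rec (dst : Int) (ncont primes : List Int) (hs : primes.Pairwise (· < ·))
    (keys : List Int) (v : Int) (hv : v ≠ dst) :
    pvN dst ncont primes keys v
      = ((pvChildrenB dst (PySem.Set.ofList ncont) primes v).map
          (fun c => if keys.any (fun k => decide (v < k) && decide (k < c)) then 0
                    else pvN dst ncont primes keys c)).sum := by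
  have hBA : pvChildrenB dst (PySem.Set.ofList ncont) primes v = pvChildrenA dst ncont primes v :=
    (pvChildren_eq dst ncont primes hs v).symm
  unfold pvN pvT
  rw [pvGetLists]
  by_cases hemp : (pvChildrenA dst ncont primes v).isEmpty
  · have hnil : pvChildrenA dst ncont primes v = [] := List.isEmpty_iff.mp hemp
    have hnilB : pvChildrenB dst (PySem.Set.ofList ncont) primes v = [] := by rw [hBA, hnil]
    have hp : pvPcov keys dst v [v] = false := by
      unfold pvPcov
      apply Bool.and_eq_false_iff.mpr
      right
      rw [PySem.List.pyGet?_neg_one]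
      simpa using hv
    rw [if_pos hemp, show ([] : List Int) ++ [v] = [v] from rfl, hnilB]
    simp [List.countP_cons, hp]
  · simp only [hemp, Bool.false_eq_true, if_false, List.nil_append]
    rw [List.countP_flatMap, hBA, Nat.cast_list_sum, List.map_map]
    congr 1
    apply List.map_congr_left
    intro c hc
    have hcb := pvChildrenA_mem dst ncont primes hs v c hc
    simp only [Function.comp_apply]
    rw [pvGetLists_prefix dst ncont primes hs ((dst + 1 - v).toNat) c [v] (by omega)]
    have hmapc : (pvT dst ncont primes c).map (fun t => [v] ++ t)
        = (pvT dst ncont primes c).map (fun t => v :: t) := by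
      apply List.map_congr_left; intro t _; rfl
    rw [hmapc, List.countP_map]
    have hcongr : List.countP (pvPcov keys dst v ∘ fun t => v :: t) (pvT dst ncont primes c)
        = List.countP (fun t => (!(keys.any (fun k => decide (v < k) && decide (k < c))))
            && pvPcov keys dst c t) (pvT dst ncont primes c) := by
      apply List.countP_congr
      intro t ht
      obtain ⟨r, hr, hgt⟩ := pvT_shape dst ncont primes hs c t ht
      have hcc := pvPcov_cons keys dst v c t hcb.1 r hr hgt
      simp only [Function.comp_apply]
      rw [hcc]
    rw [hcongr]
    by_cases hb : keys.any (fun k => decide (v < k) && decide (k < c)) = true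
    · simp [hb]
    · simp only [Bool.not_eq_true] at hb
      simp [hb, pvN, pvT]

def pvGood (dst : Int) (ncont primes : List Int) (keys : List Int)
    (memo : PySem.Dict Int Int) : Prop :=
  ∀ v r, memo.get? v = some r → r = pvN dst ncont primes keys v

theorem pvCnt_correct (dst : Int) (ncont primes : List Int) (hs : primes.Pairwise (· < ·))
    (keys : List Int) :
    ∀ (fuel : Nat) (v : Int) (memo : PySem.Dict Int Int), (dst + 1 - v).toNat < fuel →
      pvGood dst ncont primes keys memo →
      (pvCnt dst (PySem.Set.ofList ncont) keys primes fuel v memo).1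
        = pvN dst ncont primes keys v ∧
      pvGood dst ncont primes keys
        (pvCnt dst (PySem.Set.ofList ncont) keys primes fuel v memo).2 := by
  intro fuel
  induction fuel with
  | zero => intro v memo h _; omega
  | succ fuel ih =>
    intro v memo hfuel hgood
    rw [pvCnt]
    by_cases hv : v = dst
    · subst hv
      rw [if_pos rfl]
      exact ⟨by rw [pvN_dst v ncont primes hs], hgood⟩
    · rw [if_neg hv]
      cases hmemo : PySem.Dict.get? memo v with
      | some r =>
        exact ⟨hgood v r hmemo, hgood⟩
      | none =>
        have hlist : ∀ (l : List Int), (∀ c ∈ l, c ∈ pvChildrenB dst (PySem.Set.ofList ncont) primes v) →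
            ∀ (st : Int × PySem.Dict Int Int), pvGood dst ncont primes keys st.2 →
            (pvCntList keys v (pvCnt dst (PySem.Set.ofList ncont) keys primes fuel) l st).1
              = st.1 + (l.map (fun c =>
                  if keys.any (fun k => decide (v < k) && decide (k < c)) then 0
                  else pvN dst ncont primes keys c)).sum
            ∧ pvGood dst ncont primes keys
                (pvCntList keys v (pvCnt dst (PySem.Set.ofList ncont) keys primes fuel) l st).2 := by
          intro l
          induction l with
          | nil =>
            intro _ st hst
            rw [pvCntList]
            exact ⟨by simp, hst⟩
          | cons c rest ihl =>
            intro hmem st hst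
            have hcmem := hmem c List.mem_cons_self
            have hrest : ∀ c ∈ rest, c ∈ pvChildrenB dst (PySem.Set.ofList ncont) primes v :=
              fun c hc => hmem c (List.mem_cons_of_mem _ hc)
            rw [pvCntList]
            by_cases hb : keys.any (fun k => decide (v < k) && decide (k < c)) = true
            · rw [if_pos hb]
              obtain ⟨h1, h2⟩ := ihl hrest st hst
              exact ⟨by rw [h1, List.map_cons, List.sum_cons, if_pos hb]; ring, h2⟩
            · rw [if_neg hb]
              have hcm := pvChildrenB_mem dst _ primes hs v c hcmem
              obtain ⟨hr1, hr2⟩ := ih c st.2 (by omega) hst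
              obtain ⟨h1, h2⟩ :=
                ihl hrest (st.1 + (pvCnt dst (PySem.Set.ofList ncont) keys primes fuel c st.2).1,
                     (pvCnt dst (PySem.Set.ofList ncont) keys primes fuel c st.2).2) hr2
              refine ⟨?_, h2⟩
              rw [h1]
              simp only [hb, Bool.false_eq_true, if_false, List.map_cons, List.sum_cons, hr1]
              ring
        simp only [hmemo]
        obtain ⟨h1, h2⟩ :=
          hlist (pvChildrenB dst (PySem.Set.ofList ncont) primes v) (fun _ hc => hc) (0, memo) hgood
        refine ⟨?_, ?_⟩
        · rw [h1, pvN_rec dst ncont primes hs keys v hv]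
          ring
        · intro w r hw
          rw [PySem.Dict.get?_insert] at hw
          by_cases hwv : w = v
          · rw [if_pos hwv] at hw
            subst hwv
            have hr : r = (pvCntList keys w (pvCnt dst (PySem.Set.ofList ncont) keys primes fuel)
                (pvChildrenB dst (PySem.Set.ofList ncont) primes w) (0, memo)).1 :=
              (Option.some_inj.mp hw).symm
            rw [hr, h1, pvN_rec dst ncont primes hs keys w hv]
            ring
          · rw [if_neg hwv] at hw
            exact h2 w r hw

-- ===== VERDICT (by name: the statement is the Claim_ definition above) =====
theorem solve_spec : Claim_equal_solve := by
  intro src dst contains nc hdom hpre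
  have hs : (pvPrimes dst).Pairwise (· < ·) := pvPrimes_sorted dst
  unfold Spec_solve solve solve_alt
  rw [PySem.List.foldl_count_if]
  rw [show pvGetLists dst nc (pvPrimes dst) ((dst + 1 - src).toNat + 1) src []
      = pvT dst nc (pvPrimes dst) src from rfl]
  by_cases hall : (PySem.Set.ofList contains).all (fun k => decide (src ≤ k)) = true
  · rw [if_pos hall]
    have hgood : pvGood dst nc (pvPrimes dst) (PySem.Set.ofList contains)
        PySem.Dict.empty := by
      intro v r hv
      rw [PySem.Dict.get?_empty] at hv
      cases hv
    rw [(pvCnt_correct dst nc (pvPrimes dst) hs (PySem.Set.ofList contains)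
        ((dst + 1 - src).toNat + 1) src PySem.Dict.empty (by omega) hgood).1]
    unfold pvN
    rw [zero_add]
    congr 1
    apply List.countP_congr
    intro t ht
    obtain ⟨r, rfl, hr⟩ := pvT_shape dst nc (pvPrimes dst) hs src t ht
    unfold pvPcov
    simp only [Bool.and_eq_true]
    have hiff : (((PySem.Set.ofList contains).inter (PySem.Set.ofList (src :: r))).equal
        (PySem.Set.ofList contains) = true) ↔
        (((PySem.Set.ofList contains : List Int).all
          fun k => decide (k ≤ src) || (src :: r).contains k) = true) := by
      rw [PySem.Set.equal_iff]
      simp only [List.all_eq_true, Bool.or_eq_true, decide_eq_true_eq, List.contains_iff_mem]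
      constructor
      · intro h k hk
        have hk' : k ∈ contains := (PySem.Set.mem_ofList contains k).mp hk
        have : k ∈ (PySem.Set.ofList contains).inter (PySem.Set.ofList (src :: r)) := by
          rw [h k]; exact hk
        rw [PySem.Set.mem_inter, PySem.Set.mem_ofList] at this
        exact Or.inr ((PySem.Set.mem_ofList (src :: r) k).mp this.2)
      · intro h y
        rw [PySem.Set.mem_inter, PySem.Set.mem_ofList]
        constructor
        · exact fun hy => hy.1
        · intro hy
          refine ⟨hy, ?_⟩
          have hyof : y ∈ PySem.Set.ofList contains := (PySem.Set.mem_ofList contains y).mpr hy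
          have hall' := List.all_eq_true.mp hall y hyof
          simp only [decide_eq_true_eq] at hall'
          rw [PySem.Set.mem_ofList]
          rcases h y hyof with hle | hmem
          · have : y = src := le_antisymm hle hall'
            subst this
            exact List.mem_cons_self
          · exact hmem
    constructor
    · rintro ⟨h1, h2⟩
      exact ⟨hiff.mp h1, h2⟩
    · rintro ⟨h1, h2⟩
      exact ⟨hiff.mpr h1, h2⟩
  · rw [if_neg hall]
    rw [zero_add]
    have hz : List.countP (fun e =>
        ((PySem.Set.ofList contains).inter (PySem.Set.ofList e)).equal (PySem.Set.ofList contains)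
          && (PySem.List.pyGet? e (-1) == some dst))
        (pvT dst nc (pvPrimes dst) src) = 0 := by
      apply List.countP_eq_zero.mpr
      intro t ht
      obtain ⟨r, rfl, hr⟩ := pvT_shape dst nc (pvPrimes dst) hs src t ht
      have hex : ∃ k ∈ contains, k < src := by
        obtain ⟨k, hk, hnp⟩ := List.all_eq_false.mp (Bool.not_eq_true _ |>.mp hall)
        refine ⟨k, (PySem.Set.mem_ofList contains k).mp hk, ?_⟩
        simpa using hnp
      obtain ⟨k0, hk0c, hk0lt⟩ := hex
      simp only [Bool.and_eq_true, not_and]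
      intro h1 _
      rw [PySem.Set.equal_iff] at h1
      have : k0 ∈ (PySem.Set.ofList contains).inter (PySem.Set.ofList (src :: r)) := by
        rw [h1 k0]; exact (PySem.Set.mem_ofList contains k0).mpr hk0c
      rw [PySem.Set.mem_inter, PySem.Set.mem_ofList] at this
      rcases List.mem_cons.mp ((PySem.Set.mem_ofList (src :: r) k0).mp this.2) with rfl | hmm
      · omega
      · have := hr k0 hmm; omega
    rw [hz]
    simp
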